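-- pv_equiv track=rewrite | github.com/Harsh-s7-hub/Starmind-Game-by-AI | backend/csp_solver.py | choose_colonization
-- ===== SOURCE A (Python) =====
-- def csp_solve(variables, domains, constraints):
--     vars_list = list(variables)
--     assignment = {}
--     def backtrack(i=0):
--         if i == len(vars_list):
--             return assignment.copy()
--         v = vars_list[i]
--         for val in domains[v]:
--             assignment[v] = val
--             ok = True
--             for cons in constraints:
--                 try:
--                     if not cons(assignment):
--                         ok = False
--                         break
--                 except KeyError:
--                     # constraint refers to unassigned var -> ignore
--                     pass
--             if not ok:
--                 del assignment[v]
--                 continue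
--             sol = backtrack(i+1)
--             if sol is not None:
--                 return sol
--             del assignment[v]
--         return None
--     return backtrack()
--
-- def choose_colonization(empire_id, candidate_systems, empire_resources, system_costs, max_take=1):
--     """
--     Simple wrapper: choose up to max_take systems to colonize
--     - candidate_systems: list of system ids
--     - system_costs: dict system_id -> cost
--     - empire_resources: int
--     Returns chosen list (may be empty)
--     """
--     # build domains: each variable is index 0..max_take-1 with domain candidate_systems + [None]
--     vars_ = [f"slot{i}" for i in range(max_take)]
--     domains = {v: candidate_systems + [None] for v in vars_}
--     # constraints: no duplicate system (excluding None), and total cost <= resources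
--     def constraint_no_dup(assign):
--         vals = [v for v in assign.values() if v is not None]
--         return len(vals) == len(set(vals))
--     def constraint_cost(assign):
--         vals = [v for v in assign.values() if v is not None]
--         total = sum(system_costs.get(sid, 0) for sid in vals)
--         return total <= empire_resources
--
--     sol = csp_solve(vars_, domains, [constraint_no_dup, constraint_cost])
--     if not sol:
--         return []
--     chosen = [sol[v] for v in vars_ if sol[v] is not None]
--     return chosen
-- ===== SOURCE B (Python) =====
-- def choose_colonization(empire_id, candidate_systems, empire_resources, system_costs, max_take=1):
--     """Direct greedy loop: repeatedly scan candidates for the first affordable,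
--     not-yet-chosen system; stop at max_take picks or when nothing fits."""
--     chosen = []
--     total = 0
--     while len(chosen) < max_take:
--         pick = None
--         for sid in candidate_systems:
--             if sid in chosen:
--                 continue
--             if total + system_costs.get(sid, 0) <= empire_resources:
--                 pick = sid
--                 break
--         if pick is None:
--             break
--         chosen.append(pick)
--         total += system_costs.get(pick, 0)
--     return chosen
-- ===== Notes on version B (the rewrite author's own statement) =====
-- stated objective: simpler
-- what changed: Replaced the generic CSP backtracking solver (slot variables, domain lists, constraint closures and dict assignments) with a direct greedy loop that repeatedly scans the candidate list for the first affordable not-yet-chosen system until max_take picks are made or nothing fits.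
import Mathlib
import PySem

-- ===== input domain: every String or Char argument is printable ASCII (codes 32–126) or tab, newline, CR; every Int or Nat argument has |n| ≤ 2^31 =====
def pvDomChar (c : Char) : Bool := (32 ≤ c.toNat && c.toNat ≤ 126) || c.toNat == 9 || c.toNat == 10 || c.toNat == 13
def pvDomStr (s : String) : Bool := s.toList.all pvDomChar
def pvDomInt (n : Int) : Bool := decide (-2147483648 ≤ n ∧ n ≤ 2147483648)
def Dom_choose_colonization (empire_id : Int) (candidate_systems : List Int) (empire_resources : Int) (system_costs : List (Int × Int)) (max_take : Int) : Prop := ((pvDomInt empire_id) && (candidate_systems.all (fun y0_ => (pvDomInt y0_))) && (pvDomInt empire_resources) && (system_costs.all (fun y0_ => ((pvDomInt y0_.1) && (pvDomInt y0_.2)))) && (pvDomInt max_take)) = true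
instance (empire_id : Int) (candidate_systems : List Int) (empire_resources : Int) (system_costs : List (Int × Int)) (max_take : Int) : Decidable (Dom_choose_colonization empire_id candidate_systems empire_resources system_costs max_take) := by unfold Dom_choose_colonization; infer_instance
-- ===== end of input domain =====

-- B drops the generic CSP backtracker and computes the same result with a direct greedy
-- loop (repeatedly pick the first affordable not-yet-chosen system); objective: simpler.

-- ===== PORT A =====
-- Port of csp_solve exactly as A instantiates it: slot variables "slot0".., each slot's
-- domain is candidate_systems + [None], two constraints.  The constraints never raise
-- KeyError (they only read assignment.values()), so csp_solve's try/except is dead code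
-- and the port checks the two constraints directly, in order, as `&&`.

-- [v for v in assign.values() if v is not None]
def pvValsA (a : PySem.Dict String (Option Int)) : List Int :=
  (PySem.Dict.values a).filterMap id

-- constraint_no_dup: len(vals) == len(set(vals))
def pvConsNoDupA (a : PySem.Dict String (Option Int)) : Bool :=
  (pvValsA a).length == (PySem.Set.ofList (pvValsA a)).length

-- constraint_cost: sum(system_costs.get(sid, 0) for sid in vals) <= empire_resources
def pvConsCostA (costs : PySem.Dict Int Int) (res : Int) (a : PySem.Dict String (Option Int)) : Bool :=
  decide (((pvValsA a).map (fun sid => PySem.Dict.getD costs sid 0)).sum ≤ res)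

-- backtrack(i), ported as the equivalent explicit-stack depth-first search (exact,
-- step for step: `down vs a` is entering backtrack(i) with the remaining slot list vs,
-- a stack frame (v, rest, a, vals) is the for-loop of slot v paused with the values
-- vals still to try, `resume none` is that loop continuing after a constraint failure
-- or a failed recursive call, `resume (some sol)` is the early `return sol`).  Python's
-- recursion depth here is max_take+1, which overflows the Lean interpreter's stack for
-- large max_take, so the loop form is used; the proofs below relate it to the direct
-- recursive transcription pvBacktrackA and prove the two identical.
inductive PvMode
  | down : List String → PySem.Dict String (Option Int) → PvMode
  | resume : Option (PySem.Dict String (Option Int)) → PvMode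

-- termination measure: the size of the remaining search tree
def pvT (D : Nat) : Nat → Nat
  | 0 => 1
  | r + 1 => 2 + D * (2 + pvT D r)

def pvFramePot (D : Nat)
    (f : String × List String × PySem.Dict String (Option Int) × List (Option Int)) : Nat :=
  f.2.2.2.length * (2 + pvT D f.2.1.length) + 1

def pvPot (D : Nat) :
    PvMode → List (String × List String × PySem.Dict String (Option Int) × List (Option Int)) → Nat
  | .down vs _, st => (st.map (pvFramePot D)).sum + 1 + pvT D vs.length
  | .resume _, st => (st.map (pvFramePot D)).sum + 1

def pvLoop (dom : List (Option Int)) (costs : PySem.Dict Int Int) (res : Int) :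
    PvMode → List (String × List String × PySem.Dict String (Option Int) × List (Option Int)) →
    Option (PySem.Dict String (Option Int))
  | .down [] a, st => pvLoop dom costs res (.resume (some a)) st
  | .down (v :: rest) a, st => pvLoop dom costs res (.resume none) ((v, rest, a, dom) :: st)
  | .resume (some sol), _ => some sol
  | .resume none, [] => none
  | .resume none, (_, _, _, []) :: st => pvLoop dom costs res (.resume none) st
  | .resume none, (v, rest, a, val :: vals) :: st =>
    let a' := PySem.Dict.insert a v val
    if pvConsNoDupA a' && pvConsCostA costs res a' then
      pvLoop dom costs res (.down rest a') ((v, rest, a, vals) :: st)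
    else
      pvLoop dom costs res (.resume none) ((v, rest, a, vals) :: st)
termination_by m st => pvPot dom.length m st
decreasing_by
  · simp [pvPot, pvT]
  · simp [pvPot, pvFramePot, pvT, Nat.add_mul, Nat.one_mul]
    omega
  · simp [pvPot, pvFramePot]
  · simp [pvPot, pvFramePot, Nat.add_mul, Nat.one_mul]
    omega
  · simp [pvPot, pvFramePot, Nat.add_mul, Nat.one_mul]
    omega

def choose_colonization (empire_id : Int) (candidate_systems : List Int) (empire_resources : Int) (system_costs : List (Int × Int)) (max_take : Int) : List Int :=
  let vars_ := (PySem.List.pyRange 0 max_take 1).map (fun i => "slot" ++ PySem.Int.toStr i)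
  let dom := candidate_systems.map some ++ [none]
  let costs := PySem.Dict.ofList system_costs
  match pvLoop dom costs empire_resources (.down vars_ PySem.Dict.empty) [] with
  | none => []
  | some sol =>
    if PySem.Dict.size sol == 0 then []   -- `if not sol: return []`
    else vars_.filterMap (fun v => (PySem.Dict.get? sol v).bind id)  -- [sol[v] for v in vars_ if sol[v] is not None]

-- ===== PORT B =====
-- inner for-loop of Source B: first candidate not already chosen whose cost still fits
def pvPickFirst (costs : PySem.Dict Int Int) (res : Int) (chosen : List Int) (total : Int) :
    List Int → Option Int
  | [] => none
  | sid :: rest =>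
    if chosen.contains sid then pvPickFirst costs res chosen total rest
    else if total + PySem.Dict.getD costs sid 0 ≤ res then some sid
    else pvPickFirst costs res chosen total rest

-- while len(chosen) < max_take: each pass appends exactly one pick or breaks,
-- so the loop is a countdown of max_take - len(chosen) remaining slots
def pvGreedyB (cands : List Int) (costs : PySem.Dict Int Int) (res : Int) :
    Nat → List Int → Int → List Int
  | 0, chosen, _total => chosen
  | Nat.succ n, chosen, total =>
    match pvPickFirst costs res chosen total cands with
    | none => chosen
    | some sid => pvGreedyB cands costs res n (chosen ++ [sid]) (total + PySem.Dict.getD costs sid 0)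

def choose_colonization_alt (empire_id : Int) (candidate_systems : List Int) (empire_resources : Int) (system_costs : List (Int × Int)) (max_take : Int) : List Int :=
  pvGreedyB candidate_systems (PySem.Dict.ofList system_costs) empire_resources max_take.toNat [] 0

-- ===== PRECONDITION & SPEC =====
def Spec_choose_colonization (empire_id : Int) (candidate_systems : List Int) (empire_resources : Int) (system_costs : List (Int × Int)) (max_take : Int) (out : List Int) : Prop := out = choose_colonization_alt empire_id candidate_systems empire_resources system_costs max_take
instance (empire_id : Int) (candidate_systems : List Int) (empire_resources : Int) (system_costs : List (Int × Int)) (max_take : Int) (out : List Int) : Decidable (Spec_choose_colonization empire_id candidate_systems empire_resources system_costs max_take out) := by unfold Spec_choose_colonization; infer_instance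

-- ===== CLAIM (what is proved, stated in full; the proofs are below) =====
def Claim_equal_choose_colonization : Prop := ∀ (empire_id : Int) (candidate_systems : List Int) (empire_resources : Int) (system_costs : List (Int × Int)) (max_take : Int), Dom_choose_colonization empire_id candidate_systems empire_resources system_costs max_take → Spec_choose_colonization empire_id candidate_systems empire_resources system_costs max_take (choose_colonization empire_id candidate_systems empire_resources system_costs max_take)

-- ===== LEMMAS AND PROOFS =====

-- the direct recursive transcription of backtrack(i): the for-loop over the slot's
-- domain with early `return sol` is List.findSome? (first non-none result); the
-- proofs first show pvLoop computes exactly this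
def pvBacktrackA (dom : List (Option Int)) (costs : PySem.Dict Int Int) (res : Int) :
    List String → PySem.Dict String (Option Int) → Option (PySem.Dict String (Option Int))
  | [], a => some a
  | v :: rest, a =>
    dom.findSome? (fun val =>
      let a' := PySem.Dict.insert a v val
      if pvConsNoDupA a' && pvConsCostA costs res a' then
        pvBacktrackA dom costs res rest a'
      else none)

lemma pvLoop_bridge (dom : List (Option Int)) (costs : PySem.Dict Int Int) (res : Int) :
    ∀ (vs : List String) (a : PySem.Dict String (Option Int))
      (st : List (String × List String × PySem.Dict String (Option Int) × List (Option Int))),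
      pvLoop dom costs res (.down vs a) st =
        (match pvBacktrackA dom costs res vs a with
         | some s => some s
         | none => pvLoop dom costs res (.resume none) st) := by
  intro vs
  induction vs with
  | nil =>
    intro a st
    rw [pvLoop, pvLoop]
    rfl
  | cons v rest ih =>
    intro a st
    have frame : ∀ (vals : List (Option Int)) st',
        pvLoop dom costs res (.resume none) ((v, rest, a, vals) :: st') =
          (match vals.findSome? (fun val =>
              if pvConsNoDupA (PySem.Dict.insert a v val) &&
                  pvConsCostA costs res (PySem.Dict.insert a v val) then
                pvBacktrackA dom costs res rest (PySem.Dict.insert a v val)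
              else none) with
           | some s => some s
           | none => pvLoop dom costs res (.resume none) st') := by
      intro vals
      induction vals with
      | nil => intro st'; rw [pvLoop]; rfl
      | cons val vals ihv =>
        intro st'
        rw [pvLoop]
        by_cases hcons : (pvConsNoDupA (PySem.Dict.insert a v val) &&
            pvConsCostA costs res (PySem.Dict.insert a v val)) = true
        · rw [if_pos hcons, ih, ihv st']
          simp only [List.findSome?_cons]
          rw [if_pos hcons]
          cases pvBacktrackA dom costs res rest (PySem.Dict.insert a v val) <;> rfl
        · rw [if_neg hcons, ihv st']
          simp only [List.findSome?_cons]
          rw [if_neg hcons]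
    rw [pvLoop, frame dom st]
    show _ = (match pvBacktrackA dom costs res (v :: rest) a with
              | some s => some s
              | none => pvLoop dom costs res (.resume none) st)
    rw [show pvBacktrackA dom costs res (v :: rest) a =
        dom.findSome? (fun val =>
          if pvConsNoDupA (PySem.Dict.insert a v val) &&
              pvConsCostA costs res (PySem.Dict.insert a v val) then
            pvBacktrackA dom costs res rest (PySem.Dict.insert a v val)
          else none) from rfl]

lemma pvLoop_eq_backtrack (dom : List (Option Int)) (costs : PySem.Dict Int Int) (res : Int)
    (vs : List String) (a : PySem.Dict String (Option Int)) :
    pvLoop dom costs res (.down vs a) [] = pvBacktrackA dom costs res vs a := by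
  rw [pvLoop_bridge]
  cases h : pvBacktrackA dom costs res vs a
  · rw [pvLoop]
  · rfl

-- total cost of a list of picks
def pvTot (costs : PySem.Dict Int Int) (S : List Int) : Int :=
  (S.map (fun sid => PySem.Dict.getD costs sid 0)).sum

-- the NEW picks pvGreedyB makes from state (S, t)
def pvRun (cands : List Int) (costs : PySem.Dict Int Int) (res : Int) :
    Nat → List Int → Int → List Int
  | 0, _, _ => []
  | Nat.succ n, S, t =>
    match pvPickFirst costs res S t cands with
    | none => []
    | some c => c :: pvRun cands costs res n (S ++ [c]) (t + PySem.Dict.getD costs c 0)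

lemma pvGreedyB_eq_append (cands : List Int) (costs : PySem.Dict Int Int) (res : Int) :
    ∀ (n : Nat) (chosen : List Int) (total : Int),
      pvGreedyB cands costs res n chosen total = chosen ++ pvRun cands costs res n chosen total := by
  intro n
  induction n with
  | zero => intro chosen total; simp [pvGreedyB, pvRun]
  | succ n ih =>
    intro chosen total
    cases h : pvPickFirst costs res chosen total cands with
    | none => simp [pvGreedyB, pvRun, h]
    | some c => simp [pvGreedyB, pvRun, h, ih]

lemma pvRun_of_pick_none {cands : List Int} {costs : PySem.Dict Int Int} {res : Int}
    {S : List Int} {t : Int} (h : pvPickFirst costs res S t cands = none) (n : Nat) :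
    pvRun cands costs res n S t = [] := by
  cases n with
  | zero => rfl
  | succ n =>
    have hu : pvRun cands costs res (n + 1) S t =
        match pvPickFirst costs res S t cands with
        | none => []
        | some c => c :: pvRun cands costs res n (S ++ [c]) (t + PySem.Dict.getD costs c 0) := rfl
    rw [hu, h]

lemma pvPickFirst_some {costs : PySem.Dict Int Int} {res : Int} {S : List Int} {t : Int} :
    ∀ {cl : List Int} {c : Int}, pvPickFirst costs res S t cl = some c →
      S.contains c = false ∧ t + PySem.Dict.getD costs c 0 ≤ res := by
  intro cl
  induction cl with
  | nil => intro c h; simp [pvPickFirst] at h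
  | cons sid rest ih =>
    intro c h
    simp only [pvPickFirst] at h
    split_ifs at h with h1 h2
    · exact ih h
    · cases h
      exact ⟨by simpa using h1, h2⟩
    · exact ih h

lemma pvPickFirst_none {costs : PySem.Dict Int Int} {res : Int} {S : List Int} {t : Int} :
    ∀ {cl : List Int}, pvPickFirst costs res S t cl = none →
      ∀ c ∈ cl, ¬(S.contains c = false ∧ t + PySem.Dict.getD costs c 0 ≤ res) := by
  intro cl
  induction cl with
  | nil => intro _ c hc; simp at hc
  | cons sid rest ih =>
    intro h c hc
    by_cases h1 : S.contains sid
    · have hr : pvPickFirst costs res S t rest = none := by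
        simpa only [pvPickFirst, if_pos h1] using h
      rcases List.mem_cons.mp hc with rfl | hc'
      · rintro ⟨hF, _⟩; rw [h1] at hF; exact Bool.noConfusion hF
      · exact ih hr c hc'
    · by_cases h2 : t + PySem.Dict.getD costs sid 0 ≤ res
      · exfalso
        have hx : (some sid : Option Int) = none := by
          simpa only [pvPickFirst, if_neg h1, if_pos h2] using h
        cases hx
      · have hr : pvPickFirst costs res S t rest = none := by
          simpa only [pvPickFirst, if_neg h1, if_neg h2] using h
        rcases List.mem_cons.mp hc with rfl | hc'
        · rintro ⟨_, hcost⟩; exact h2 hcost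
        · exact ih hr c hc' 

-- fresh-key insert appends to the value list
lemma pvVals_insert (a : PySem.Dict String (Option Int)) (v : String) (val : Option Int)
    (h : a.get? v = none) :
    pvValsA (PySem.Dict.insert a v val) = pvValsA a ++ val.toList := by
  have hc : a.contains v = false := by
    rw [PySem.Dict.contains_eq_isSome_get?, h]; rfl
  have hi := PySem.Dict.items_insert_of_not_contains a val hc
  unfold pvValsA
  rw [PySem.Dict.values, PySem.Dict.values, hi]
  cases val <;> simp

lemma pvConsNoDup_some {a : PySem.Dict String (Option Int)} {v : String} (c : Int)
    (h : a.get? v = none) (hnd : (pvValsA a).Nodup) :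
    pvConsNoDupA (PySem.Dict.insert a v (some c)) = !((pvValsA a).contains c) := by
  unfold pvConsNoDupA
  rw [pvVals_insert a v (some c) h]
  simp only [Option.toList]
  rw [PySem.Set.ofList_append_singleton, PySem.Set.ofList_eq_self_of_nodup _ hnd]
  cases hc : (pvValsA a).contains c with
  | true =>
    have hcm : c ∈ pvValsA a := by simpa using hc
    simp only [PySem.Set.add]
    rw [if_pos (by simp [hcm])]
    simp only [List.length_append, List.length_cons, List.length_nil, Bool.not_true]
    rw [beq_eq_false_iff_ne]
    omega
  | false =>
    have hcm : c ∉ pvValsA a := by simpa using hc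
    simp only [PySem.Set.add]
    rw [if_neg (by simp [hcm])]
    simp

lemma pvConsNoDup_none {a : PySem.Dict String (Option Int)} {v : String}
    (h : a.get? v = none) (hnd : (pvValsA a).Nodup) :
    pvConsNoDupA (PySem.Dict.insert a v none) = true := by
  unfold pvConsNoDupA
  rw [pvVals_insert a v none h]
  simp [PySem.Set.ofList_eq_self_of_nodup _ hnd]

lemma pvConsCost_some {a : PySem.Dict String (Option Int)} {v : String} (c : Int)
    (costs : PySem.Dict Int Int) (res : Int) (h : a.get? v = none) :
    pvConsCostA costs res (PySem.Dict.insert a v (some c))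
      = decide (pvTot costs (pvValsA a) + PySem.Dict.getD costs c 0 ≤ res) := by
  unfold pvConsCostA
  rw [pvVals_insert a v (some c) h]
  simp [pvTot]

lemma pvConsCost_none {a : PySem.Dict String (Option Int)} {v : String}
    (costs : PySem.Dict Int Int) (res : Int) (h : a.get? v = none) :
    pvConsCostA costs res (PySem.Dict.insert a v none)
      = decide (pvTot costs (pvValsA a) ≤ res) := by
  unfold pvConsCostA
  rw [pvVals_insert a v none h]
  simp [pvTot]

-- the scan of one slot over the real candidates: first value passing both constraints,
-- provided every fitting candidate makes the recursion succeed
lemma pvScan (dom : List (Option Int)) (costs : PySem.Dict Int Int) (res : Int)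
    (rest : List String) (a : PySem.Dict String (Option Int)) (v : String)
    (hfv : a.get? v = none) (hnd : (pvValsA a).Nodup) :
    ∀ cl : List Int,
      (∀ c ∈ cl, (pvValsA a).contains c = false →
        pvTot costs (pvValsA a) + PySem.Dict.getD costs c 0 ≤ res →
        (pvBacktrackA dom costs res rest (PySem.Dict.insert a v (some c))).isSome) →
      List.findSome? (fun val =>
          if pvConsNoDupA (PySem.Dict.insert a v val) && pvConsCostA costs res (PySem.Dict.insert a v val) then
            pvBacktrackA dom costs res rest (PySem.Dict.insert a v val)
          else none) (cl.map some)
        = (pvPickFirst costs res (pvValsA a) (pvTot costs (pvValsA a)) cl).bind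
            (fun c => pvBacktrackA dom costs res rest (PySem.Dict.insert a v (some c))) := by
  intro cl
  induction cl with
  | nil => intro _; simp [pvPickFirst]
  | cons c cl ih =>
    intro H
    have htail := ih (fun c' hc' => H c' (List.mem_cons_of_mem _ hc'))
    simp only [List.map_cons, List.findSome?_cons]
    rw [pvConsNoDup_some c hfv hnd, pvConsCost_some c costs res hfv]
    cases hc : (pvValsA a).contains c with
    | true =>
      simp only [Bool.not_true, Bool.false_and, Bool.false_eq_true, if_false]
      rw [htail]
      simp only [pvPickFirst]
      rw [if_pos hc]
    | false =>
      simp only [Bool.not_false, Bool.true_and]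
      by_cases hcost : pvTot costs (pvValsA a) + PySem.Dict.getD costs c 0 ≤ res
      · obtain ⟨sol, hsol⟩ := Option.isSome_iff_exists.mp (H c List.mem_cons_self hc hcost)
        rw [decide_eq_true hcost, if_pos rfl, hsol]
        simp only [pvPickFirst, hc]
        rw [if_neg (by simp), if_pos hcost]
        simp [hsol]
      · rw [decide_eq_false hcost]
        simp only [Bool.false_eq_true, if_false]
        rw [htail]
        simp only [pvPickFirst, hc]
        rw [if_neg (by simp), if_neg hcost]

lemma pvMain (cands : List Int) (costs : PySem.Dict Int Int) (res : Int) :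
    ∀ (vs : List String) (a : PySem.Dict String (Option Int)),
      vs.Nodup → (∀ v ∈ vs, a.get? v = none) → (pvValsA a).Nodup →
      (pvTot costs (pvValsA a) ≤ res ∨
        (pvPickFirst costs res (pvValsA a) (pvTot costs (pvValsA a)) cands).isSome) →
      ∃ sol, pvBacktrackA (cands.map some ++ [none]) costs res vs a = some sol ∧
        (∀ w, w ∉ vs → sol.get? w = a.get? w) ∧
        (∀ v ∈ vs, (sol.get? v).isSome) ∧
        vs.filterMap (fun v => (sol.get? v).bind id)
          = pvRun cands costs res vs.length (pvValsA a) (pvTot costs (pvValsA a)) := by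
  intro vs
  induction vs with
  | nil =>
    intro a _ _ _ _
    exact ⟨a, rfl, fun w _ => rfl, by simp, by simp [pvRun]⟩
  | cons v rest ih =>
    intro a hnd hfresh hvals hdisj
    have hfv : a.get? v = none := hfresh v (List.mem_cons_self)
    have hvnotin : v ∉ rest := (List.nodup_cons.mp hnd).1
    have hndrest : rest.Nodup := (List.nodup_cons.mp hnd).2
    -- every fitting candidate makes the recursion succeed
    have Hfit : ∀ c, (pvValsA a).contains c = false →
        pvTot costs (pvValsA a) + PySem.Dict.getD costs c 0 ≤ res →
        ∃ sol, pvBacktrackA (cands.map some ++ [none]) costs res rest (PySem.Dict.insert a v (some c)) = some sol ∧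
          (∀ w, w ∉ rest → sol.get? w = (PySem.Dict.insert a v (some c)).get? w) ∧
          (∀ u ∈ rest, (sol.get? u).isSome) ∧
          rest.filterMap (fun u => (sol.get? u).bind id)
            = pvRun cands costs res rest.length (pvValsA a ++ [c])
                (pvTot costs (pvValsA a) + PySem.Dict.getD costs c 0) := by
      intro c hcF hcost
      have hfresh' : ∀ w ∈ rest, (PySem.Dict.insert a v (some c)).get? w = none := by
        intro w hw
        rw [PySem.Dict.get?_insert]
        rw [if_neg (by rintro rfl; exact hvnotin hw)]
        exact hfresh w (List.mem_cons_of_mem _ hw)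
      have hvals' : pvValsA (PySem.Dict.insert a v (some c)) = pvValsA a ++ [c] := by
        simpa using pvVals_insert a v (some c) hfv
      have hcm : c ∉ pvValsA a := by simpa using hcF
      have hnd' : (pvValsA (PySem.Dict.insert a v (some c))).Nodup := by
        rw [hvals']
        refine hvals.append (List.nodup_singleton c) ?_
        intro x hx hxc
        rw [List.mem_singleton] at hxc
        exact hcm (hxc ▸ hx)
      have htot' : pvTot costs (pvValsA (PySem.Dict.insert a v (some c)))
          = pvTot costs (pvValsA a) + PySem.Dict.getD costs c 0 := by
        rw [hvals']; simp [pvTot]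
      obtain ⟨sol, hbt, hpres, hsome, hext⟩ :=
        ih (PySem.Dict.insert a v (some c)) hndrest hfresh' hnd' (by rw [htot']; exact Or.inl hcost)
      exact ⟨sol, hbt, hpres, hsome, by rw [hext, htot', hvals']⟩
    have H : ∀ c ∈ cands, (pvValsA a).contains c = false →
        pvTot costs (pvValsA a) + PySem.Dict.getD costs c 0 ≤ res →
        (pvBacktrackA (cands.map some ++ [none]) costs res rest (PySem.Dict.insert a v (some c))).isSome := by
      intro c _ hcF hcost
      obtain ⟨sol, hbt, -, -, -⟩ := Hfit c hcF hcost
      simp [hbt]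
    cases hpick : pvPickFirst costs res (pvValsA a) (pvTot costs (pvValsA a)) cands with
    | some c =>
      obtain ⟨hcF, hcost⟩ := pvPickFirst_some hpick
      obtain ⟨sol, hbt, hpres, hsome, hext⟩ := Hfit c hcF hcost
      have hsolv : sol.get? v = some (some c) := by
        rw [hpres v hvnotin, PySem.Dict.get?_insert, if_pos rfl]
      refine ⟨sol, ?_, ?_, ?_, ?_⟩
      · simp only [pvBacktrackA]
        rw [List.findSome?_append, pvScan _ _ _ _ _ _ hfv hvals cands H, hpick]
        simp [hbt]
      · intro w hw
        have hwv : w ≠ v := fun hwv => hw (hwv ▸ List.mem_cons_self)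
        have hwr : w ∉ rest := fun hwr => hw (List.mem_cons_of_mem _ hwr)
        rw [hpres w hwr, PySem.Dict.get?_insert, if_neg hwv]
      · intro u hu
        rcases List.mem_cons.mp hu with rfl | hu'
        · rw [hsolv]; rfl
        · exact hsome u hu'
      · have hheadv : (sol.get? v).bind id = some c := by rw [hsolv]; rfl
        rw [List.filterMap_cons]
        simp only [hheadv]
        rw [hext]
        simp only [List.length_cons, pvRun, hpick]
    | none =>
      have hres : pvTot costs (pvValsA a) ≤ res := by
        rcases hdisj with h | h
        · exact h
        · rw [hpick] at h; cases h
      have hfresh' : ∀ w ∈ rest, (PySem.Dict.insert a v none).get? w = none := by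
        intro w hw
        rw [PySem.Dict.get?_insert]
        rw [if_neg (by rintro rfl; exact hvnotin hw)]
        exact hfresh w (List.mem_cons_of_mem _ hw)
      have hvals' : pvValsA (PySem.Dict.insert a v none) = pvValsA a := by
        simpa using pvVals_insert a v none hfv
      obtain ⟨sol, hbt, hpres, hsome, hext⟩ :=
        ih (PySem.Dict.insert a v none) hndrest hfresh' (hvals' ▸ hvals) (by rw [hvals']; exact Or.inl hres)
      have hsolv : sol.get? v = some none := by
        rw [hpres v hvnotin, PySem.Dict.get?_insert, if_pos rfl]
      refine ⟨sol, ?_, ?_, ?_, ?_⟩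
      · simp only [pvBacktrackA]
        rw [List.findSome?_append, pvScan _ _ _ _ _ _ hfv hvals cands H, hpick]
        simp only [Option.bind_none, Option.none_or, List.findSome?_cons, List.findSome?_nil]
        rw [pvConsNoDup_none hfv hvals, pvConsCost_none costs res hfv]
        rw [decide_eq_true hres]
        simp [hbt]
      · intro w hw
        have hwv : w ≠ v := fun hwv => hw (hwv ▸ List.mem_cons_self)
        have hwr : w ∉ rest := fun hwr => hw (List.mem_cons_of_mem _ hwr)
        rw [hpres w hwr, PySem.Dict.get?_insert, if_neg hwv]
      · intro u hu
        rcases List.mem_cons.mp hu with rfl | hu'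
        · rw [hsolv]; rfl
        · exact hsome u hu'
      · have hheadv : (sol.get? v).bind id = none := by rw [hsolv]; rfl
        rw [List.filterMap_cons]
        simp only [hheadv]
        rw [hext, hvals']
        rw [pvRun_of_pick_none hpick, pvRun_of_pick_none hpick]

def pvDig (n : Nat) : List Char :=
  if h : n < 10 then [Nat.digitChar n]
  else pvDig (n / 10) ++ [Nat.digitChar (n % 10)]
decreasing_by exact Nat.div_lt_self (by omega) (by omega)

lemma pvDig_lt {n : Nat} (h : n < 10) : pvDig n = [Nat.digitChar n] := by
  rw [pvDig, dif_pos h]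

lemma pvDig_ge {n : Nat} (h : ¬ n < 10) :
    pvDig n = pvDig (n / 10) ++ [Nat.digitChar (n % 10)] := by
  rw [pvDig, dif_neg h]

lemma pvToDigitsCore_eq : ∀ (f n : Nat) (l : List Char), n < f →
    Nat.toDigitsCore 10 f n l = pvDig n ++ l := by
  intro f
  induction f with
  | zero => intro n l h; omega
  | succ f ih =>
    intro n l h
    simp only [Nat.toDigitsCore]
    by_cases h10 : n / 10 = 0
    · have hn : n < 10 := by omega
      rw [if_pos h10, pvDig_lt hn, Nat.mod_eq_of_lt hn]
      simp
    · have hn : ¬ n < 10 := fun hlt => h10 (Nat.div_eq_of_lt hlt)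
      rw [if_neg h10, ih (n / 10) _ (by omega), pvDig_ge hn]
      simp

lemma pvDig_ne_nil (n : Nat) : pvDig n ≠ [] := by
  unfold pvDig
  split_ifs <;> simp

lemma pvDig_inj : ∀ n m : Nat, pvDig n = pvDig m → n = m := by
  have hdc : ∀ a : Nat, a < 10 → ∀ b : Nat, b < 10 →
      Nat.digitChar a = Nat.digitChar b → a = b := by decide
  intro n
  induction n using Nat.strong_induction_on with
  | _ n ihs =>
    intro m h
    by_cases hn : n < 10 <;> by_cases hm : m < 10
    · rw [pvDig_lt hn, pvDig_lt hm] at h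
      exact hdc n hn m hm (by simpa using h)
    · exfalso
      rw [pvDig_lt hn, pvDig_ge hm] at h
      have hl := congrArg List.length h
      simp only [List.length_cons, List.length_nil, List.length_append] at hl
      have := List.length_pos_of_ne_nil (pvDig_ne_nil (m / 10))
      omega
    · exfalso
      rw [pvDig_ge hn, pvDig_lt hm] at h
      have hl := congrArg List.length h
      simp only [List.length_cons, List.length_nil, List.length_append] at hl
      have := List.length_pos_of_ne_nil (pvDig_ne_nil (n / 10))
      omega
    · rw [pvDig_ge hn, pvDig_ge hm] at h
      have h2 := congrArg List.reverse h
      simp only [List.reverse_append, List.reverse_cons, List.reverse_nil, List.nil_append,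
        List.singleton_append, List.cons.injEq] at h2
      obtain ⟨hd, ht⟩ := h2
      have hmod : n % 10 = m % 10 :=
        hdc _ (Nat.mod_lt _ (by omega)) _ (Nat.mod_lt _ (by omega)) hd
      have hdiv : n / 10 = m / 10 :=
        ihs (n / 10) (Nat.div_lt_self (by omega) (by omega)) (m / 10) (List.reverse_inj.mp ht)
      omega

lemma pvToChars_inj {i j : Int} (hi : 0 ≤ i) (hj : 0 ≤ j)
    (h : PySem.Int.toChars i = PySem.Int.toChars j) : i = j := by
  unfold PySem.Int.toChars at h
  rw [if_neg (by omega), if_neg (by omega)] at h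
  unfold Nat.toDigits at h
  rw [pvToDigitsCore_eq _ _ _ (Nat.lt_succ_self _),
      pvToDigitsCore_eq _ _ _ (Nat.lt_succ_self _)] at h
  simp only [List.append_nil] at h
  have := pvDig_inj _ _ h
  omega

lemma pvVars_nodup (mt : Int) :
    ((PySem.List.pyRange 0 mt 1).map (fun i => "slot" ++ PySem.Int.toStr i)).Nodup := by
  refine List.Nodup.map_on ?_ (PySem.List.nodup_pyRange_one 0 mt)
  intro i hi j hj hEq
  have hi0 : 0 ≤ i := ((PySem.List.mem_pyRange_one).mp hi).1
  have hj0 : 0 ≤ j := ((PySem.List.mem_pyRange_one).mp hj).1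
  have h := congrArg String.toList hEq
  rw [String.toList_append, String.toList_append,
      PySem.Int.toList_toStr, PySem.Int.toList_toStr] at h
  exact pvToChars_inj hi0 hj0 (List.append_cancel_left h)

-- ===== VERDICT (by name: the statement is the Claim_ definition above) =====
theorem choose_colonization_spec : Claim_equal_choose_colonization := by
  unfold Claim_equal_choose_colonization
  intro eid cands res costsL mt _
  unfold Spec_choose_colonization choose_colonization choose_colonization_alt
  rcases le_or_gt mt 0 with hmt | hmt
  · rw [PySem.List.pyRange_one_eq_nil hmt, Int.toNat_of_nonpos hmt]
    simp [pvLoop_eq_backtrack, pvBacktrackA, pvGreedyB]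
  · have hval0 : pvValsA PySem.Dict.empty = [] := rfl
    have htot0 : pvTot (PySem.Dict.ofList costsL) [] = 0 := rfl
    have hfresh0 : ∀ v ∈ (PySem.List.pyRange 0 mt 1).map (fun i => "slot" ++ PySem.Int.toStr i),
        (PySem.Dict.empty : PySem.Dict String (Option Int)).get? v = none :=
      fun v _ => PySem.Dict.get?_empty v
    have hlen : ((PySem.List.pyRange 0 mt 1).map (fun i => "slot" ++ PySem.Int.toStr i)).length
        = mt.toNat := by
      simp [PySem.List.length_pyRange_one]
    by_cases hdisj : (0 : Int) ≤ res ∨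
        (pvPickFirst (PySem.Dict.ofList costsL) res [] 0 cands).isSome
    · obtain ⟨sol, hbt, hpres, hsome, hext⟩ :=
        pvMain cands (PySem.Dict.ofList costsL) res
          ((PySem.List.pyRange 0 mt 1).map (fun i => "slot" ++ PySem.Int.toStr i))
          PySem.Dict.empty (pvVars_nodup mt) hfresh0 (by rw [hval0]; exact List.nodup_nil)
          (by rw [hval0, htot0]; exact hdisj)
      rw [hval0, htot0] at hext
      have hv0 : ("slot" ++ PySem.Int.toStr 0)
          ∈ (PySem.List.pyRange 0 mt 1).map (fun i => "slot" ++ PySem.Int.toStr i) := by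
        refine List.mem_map_of_mem ?_
        rw [PySem.List.mem_pyRange_one]
        omega
      have hcont : sol.contains ("slot" ++ PySem.Int.toStr 0) = true := by
        rw [PySem.Dict.contains_eq_isSome_get?]
        exact hsome _ hv0
      have hknil : sol.items ≠ [] := by
        intro h0
        have hk := (PySem.Dict.contains_iff_mem_keys _ _).mp hcont
        rw [PySem.Dict.keys, h0] at hk
        simp at hk
      have hsize : (PySem.Dict.size sol == 0) = false := by
        rw [beq_eq_false_iff_ne, PySem.Dict.size]
        simpa [List.length_eq_zero_iff] using hknil
      simp only [pvLoop_eq_backtrack, hbt, hsize, Bool.false_eq_true, if_false]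
      rw [hext, hlen, pvGreedyB_eq_append]
      simp
    · rw [not_or] at hdisj
      obtain ⟨hres', hpick'⟩ := hdisj
      have hres : res < 0 := by omega
      have hpick : pvPickFirst (PySem.Dict.ofList costsL) res [] 0 cands = none :=
        Option.not_isSome_iff_eq_none.mp hpick'
      have H : ∀ c ∈ cands, (pvValsA (PySem.Dict.empty : PySem.Dict String (Option Int))).contains c = false →
          pvTot (PySem.Dict.ofList costsL) (pvValsA (PySem.Dict.empty : PySem.Dict String (Option Int)))
            + PySem.Dict.getD (PySem.Dict.ofList costsL) c 0 ≤ res →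
          (pvBacktrackA (cands.map some ++ [none]) (PySem.Dict.ofList costsL) res
            ((PySem.List.pyRange (0 + 1) mt 1).map (fun i => "slot" ++ PySem.Int.toStr i))
            (PySem.Dict.insert PySem.Dict.empty ("slot" ++ PySem.Int.toStr 0) (some c))).isSome := by
        intro c hc hcF hcost
        exfalso
        rw [hval0] at hcF
        rw [hval0, htot0] at hcost
        exact pvPickFirst_none hpick c hc ⟨hcF, hcost⟩
      rw [PySem.List.pyRange_one_cons hmt]
      have hbtnone : pvBacktrackA (cands.map some ++ [none]) (PySem.Dict.ofList costsL) res
          (("slot" ++ PySem.Int.toStr 0) :: (PySem.List.pyRange (0 + 1) mt 1).map (fun i => "slot" ++ PySem.Int.toStr i))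
          PySem.Dict.empty = none := by
        simp only [pvBacktrackA]
        rw [List.findSome?_append,
            pvScan _ _ _ _ _ _ (PySem.Dict.get?_empty _) (by rw [hval0]; exact List.nodup_nil) cands H,
            hval0, htot0, hpick]
        simp only [Option.bind_none, Option.none_or, List.findSome?_cons, List.findSome?_nil]
        rw [pvConsNoDup_none (PySem.Dict.get?_empty _) (by rw [hval0]; exact List.nodup_nil),
            pvConsCost_none _ _ (PySem.Dict.get?_empty _), hval0, htot0]
        rw [decide_eq_false (by omega)]
        simp
      simp only [pvLoop_eq_backtrack, List.map_cons, hbtnone]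
      rw [pvGreedyB_eq_append, pvRun_of_pick_none hpick]
      simp
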